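-- pv_equiv track=rewrite | github.com/waldfalke/rus-100 | project-starter/Examples/contracts/tests/static/consistency/test_contract_consistency.py | _find_contradictions_between_conditions
-- ===== SOURCE A (Python) =====
-- def _find_contradictions_between_conditions(conditions1, conditions2):
--     """
--     Находит противоречия между двумя списками условий.
--
--     Args:
--         conditions1: Первый список условий
--         conditions2: Второй список условий
--
--     Returns:
--         Список найденных противоречий
--     """
--     contradictions = []
--
--     for cond1 in conditions1:
--         for cond2 in conditions2:
--             # Проверяем противоречия типа "x > 0" и "x <= 0"
--             if ">" in cond1 and "<=" in cond2 and cond1.split(">")[0].strip() == cond2.split("<=")[0].strip():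
--                 contradictions.append(f"Противоречие: '{cond1}' и '{cond2}'")
--
--             # Проверяем противоречия типа "x < 0" и "x >= 0"
--             if "<" in cond1 and ">=" in cond2 and cond1.split("<")[0].strip() == cond2.split(">=")[0].strip():
--                 contradictions.append(f"Противоречие: '{cond1}' и '{cond2}'")
--
--             # Проверяем противоречия типа "x == 0" и "x != 0"
--             if "==" in cond1 and "!=" in cond2 and cond1.split("==")[0].strip() == cond2.split("!=")[0].strip():
--                 contradictions.append(f"Противоречие: '{cond1}' и '{cond2}'")
--
--     return contradictions
-- ===== SOURCE B (Python) =====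
-- def _index_by_left(conditions, op):
--     """Map stripped left-hand side of each condition containing op -> ascending list of its indices."""
--     d = {}
--     for j, c in enumerate(conditions):
--         if op in c:
--             d.setdefault(c.split(op)[0].strip(), []).append(j)
--     return d
--
--
-- def _find_contradictions_between_conditions(conditions1, conditions2):
--     by_le = _index_by_left(conditions2, "<=")
--     by_ge = _index_by_left(conditions2, ">=")
--     by_ne = _index_by_left(conditions2, "!=")
--     out = []
--     for c1 in conditions1:
--         js = []
--         if ">" in c1:
--             js += by_le.get(c1.split(">")[0].strip(), [])
--         if "<" in c1:
--             js += by_ge.get(c1.split("<")[0].strip(), [])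
--         if "==" in c1:
--             js += by_ne.get(c1.split("==")[0].strip(), [])
--         js.sort()
--         for j in js:
--             out.append(f"Противоречие: '{c1}' и '{conditions2[j]}'")
--     return out
-- ===== Notes on version B (the rewrite author's own statement) =====
-- stated objective: faster
-- what changed: Instead of re-scanning conditions2 for every cond1 (three split/strip tests per pair), B builds three dictionaries over conditions2 once, keyed by operator ('<='/'>='/'!=') and stripped left-hand side mapping to index lists, then per cond1 looks up its (at most three) keys and emits the matched pairs sorted back into conditions2 order.
import Mathlib
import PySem

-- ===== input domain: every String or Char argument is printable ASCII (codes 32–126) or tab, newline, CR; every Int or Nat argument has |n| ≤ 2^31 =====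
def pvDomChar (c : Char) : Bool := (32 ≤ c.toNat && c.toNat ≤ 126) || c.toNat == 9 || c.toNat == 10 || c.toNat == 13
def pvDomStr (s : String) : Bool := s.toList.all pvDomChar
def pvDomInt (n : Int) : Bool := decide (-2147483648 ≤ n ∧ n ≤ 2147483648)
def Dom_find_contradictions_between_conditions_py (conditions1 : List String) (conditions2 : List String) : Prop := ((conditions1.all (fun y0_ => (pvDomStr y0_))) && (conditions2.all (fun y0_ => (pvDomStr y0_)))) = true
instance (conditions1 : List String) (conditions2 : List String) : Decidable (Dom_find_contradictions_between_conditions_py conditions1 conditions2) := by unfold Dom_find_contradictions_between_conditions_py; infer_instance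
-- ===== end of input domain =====

-- B replaces A's nested scan of conditions2 per cond1 by three (left-hand-side -> index list)
-- dictionaries built once over conditions2; per cond1 it looks its keys up and emits the matches
-- in original order (objective: faster — the inner scan disappears).

-- shared helper: what both Pythons compute as  c.split(op)[0].strip()
def pvKey (c op : String) : String :=
  PySem.Str.strip (((PySem.Str.split? c op).getD []).headD "")

-- shared helper: the f-string  f"Противоречие: '{cond1}' и '{cond2}'"
def pvMsg (c1 c2 : String) : String :=
  "Противоречие: '" ++ c1 ++ "' и '" ++ c2 ++ "'"

-- ===== PORT A =====
def find_contradictions_between_conditions_py (conditions1 : List String) (conditions2 : List String) : List String :=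
  conditions1.foldl (fun contradictions cond1 =>
    conditions2.foldl (fun contradictions cond2 =>
      let contradictions :=
        if PySem.Str.isIn ">" cond1 && PySem.Str.isIn "<=" cond2 && (pvKey cond1 ">" == pvKey cond2 "<=")
        then contradictions ++ [pvMsg cond1 cond2] else contradictions
      let contradictions :=
        if PySem.Str.isIn "<" cond1 && PySem.Str.isIn ">=" cond2 && (pvKey cond1 "<" == pvKey cond2 ">=")
        then contradictions ++ [pvMsg cond1 cond2] else contradictions
      if PySem.Str.isIn "==" cond1 && PySem.Str.isIn "!=" cond2 && (pvKey cond1 "==" == pvKey cond2 "!=")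
      then contradictions ++ [pvMsg cond1 cond2] else contradictions) contradictions) []

-- ===== PORT B =====
-- helper _index_by_left of Source B: dict mapping stripped left-hand side -> ascending list of indices
def pvIndexByLeft (conditions : List String) (op : String) : PySem.Dict String (List Int) :=
  (PySem.List.enumerate conditions).foldl (fun d p =>
    if PySem.Str.isIn op p.2 then d.modify (pvKey p.2 op) [] (fun v => v ++ [p.1]) else d)
    PySem.Dict.empty

def find_contradictions_between_conditions_py_alt (conditions1 : List String) (conditions2 : List String) : List String :=
  let by_le := pvIndexByLeft conditions2 "<="
  let by_ge := pvIndexByLeft conditions2 ">="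
  let by_ne := pvIndexByLeft conditions2 "!="
  conditions1.foldl (fun out c1 =>
    let js : List Int := []
    let js := if PySem.Str.isIn ">" c1 then js ++ by_le.getD (pvKey c1 ">") [] else js
    let js := if PySem.Str.isIn "<" c1 then js ++ by_ge.getD (pvKey c1 "<") [] else js
    let js := if PySem.Str.isIn "==" c1 then js ++ by_ne.getD (pvKey c1 "==") [] else js
    let js := PySem.List.sorted js (fun j => j)
    js.foldl (fun out j => out ++ [pvMsg c1 ((PySem.List.pyGet? conditions2 j).getD "")]) out) []

-- ===== PRECONDITION & SPEC =====
def Spec_find_contradictions_between_conditions_py (conditions1 : List String) (conditions2 : List String) (out : List String) : Prop := out = find_contradictions_between_conditions_py_alt conditions1 conditions2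
instance (conditions1 : List String) (conditions2 : List String) (out : List String) : Decidable (Spec_find_contradictions_between_conditions_py conditions1 conditions2 out) := by unfold Spec_find_contradictions_between_conditions_py; infer_instance

-- ===== CLAIM (what is proved, stated in full; the proofs are below) =====
def Claim_equal_find_contradictions_between_conditions_py : Prop := ∀ (conditions1 : List String) (conditions2 : List String), Dom_find_contradictions_between_conditions_py conditions1 conditions2 → Spec_find_contradictions_between_conditions_py conditions1 conditions2 (find_contradictions_between_conditions_py conditions1 conditions2)

-- ===== LEMMAS AND PROOFS =====

-- the three pair tests of A, read off an enumerated element of conditions2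
def pvT1 (c1 : String) (p : Int × String) : Bool :=
  PySem.Str.isIn ">" c1 && PySem.Str.isIn "<=" p.2 && (pvKey c1 ">" == pvKey p.2 "<=")
def pvT2 (c1 : String) (p : Int × String) : Bool :=
  PySem.Str.isIn "<" c1 && PySem.Str.isIn ">=" p.2 && (pvKey c1 "<" == pvKey p.2 ">=")
def pvT3 (c1 : String) (p : Int × String) : Bool :=
  PySem.Str.isIn "==" c1 && PySem.Str.isIn "!=" p.2 && (pvKey c1 "==" == pvKey p.2 "!=")

-- what A's inner loop body appends for one pair (cond1, cond2)
def pvGA (c1 c2 : String) : List String :=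
  (if pvT1 c1 (0, c2) then [pvMsg c1 c2] else []) ++ (if pvT2 c1 (0, c2) then [pvMsg c1 c2] else [])
    ++ (if pvT3 c1 (0, c2) then [pvMsg c1 c2] else [])

-- the index multiset B collects for one c1, written over the enumeration
def pvJs (c1 : String) (E : List (Int × String)) : List Int :=
  (E.filter (pvT1 c1)).map (fun p => p.1) ++ (E.filter (pvT2 c1)).map (fun p => p.1)
    ++ (E.filter (pvT3 c1)).map (fun p => p.1)

-- the same indices merged in conditions2 order, with per-pair multiplicity
def pvMerged (c1 : String) (E : List (Int × String)) : List Int :=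
  E.flatMap (fun p => (if pvT1 c1 p then [p.1] else []) ++ (if pvT2 c1 p then [p.1] else [])
    ++ (if pvT3 c1 p then [p.1] else []))

theorem pvBeqComm (a b : String) : (a == b) = (b == a) := by
  by_cases h : a = b
  · simp [h]
  · simp [beq_false_of_ne h, beq_false_of_ne (Ne.symm h)]

theorem pvIndexFold_getD (op k : String) (E : List (Int × String)) (d : PySem.Dict String (List Int)) :
    (E.foldl (fun d p =>
      if PySem.Str.isIn op p.2 then d.modify (pvKey p.2 op) [] (fun v => v ++ [p.1]) else d) d).getD k []
      = d.getD k [] ++ (E.filter (fun p => PySem.Str.isIn op p.2 && (pvKey p.2 op == k))).map (fun p => p.1) := by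
  induction E generalizing d with
  | nil => simp
  | cons p E ih =>
    simp only [List.foldl_cons, List.filter_cons]
    by_cases h1 : PySem.Str.isIn op p.2 = true
    · by_cases h2 : pvKey p.2 op = k
      · subst h2
        simp only [h1, if_true, Bool.and_self, BEq.rfl, ih, List.map_cons,
          PySem.Dict.getD_modify_self]
        simp [List.append_assoc]
      · simp only [h1, if_true, beq_false_of_ne h2, Bool.and_false, ih,
          PySem.Dict.getD_modify_of_ne _ _ _ (Ne.symm h2)]
        simp
    · simp only [eq_false_of_ne_true h1, Bool.false_and, ih]
      simp

theorem pvIndexByLeft_getD (L : List String) (op k : String) :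
    (pvIndexByLeft L op).getD k [] =
      ((PySem.List.enumerate L).filter
        (fun p => PySem.Str.isIn op p.2 && (pvKey p.2 op == k))).map (fun p => p.1) := by
  unfold pvIndexByLeft
  rw [pvIndexFold_getD]
  simp

theorem pvPerm {α β : Type} [DecidableEq β] (E : List α) (q1 q2 q3 : α → Bool) (f : α → β) :
    ((E.filter q1).map f ++ (E.filter q2).map f ++ (E.filter q3).map f).Perm
      (E.flatMap (fun p => (if q1 p then [f p] else []) ++ (if q2 p then [f p] else [])
        ++ (if q3 p then [f p] else []))) := by
  induction E with
  | nil => simp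
  | cons p E ih =>
    simp only [List.filter_cons, List.flatMap_cons]
    by_cases h1 : q1 p <;> by_cases h2 : q2 p <;> by_cases h3 : q3 p <;>
      · rw [List.perm_iff_count]
        intro a
        have hc := ih.count_eq a
        simp [List.count_append, List.count_cons, h1, h2, h3] at hc ⊢
        omega

theorem pvEnum_cons {α : Type} (x : α) (l : List α) (k : Int) :
    PySem.List.enumerate (x::l) k = (k,x) :: PySem.List.enumerate l (k+1) := rfl

theorem pvEnumerate_lb {α : Type} (L : List α) (k : Int) :
    ∀ p ∈ PySem.List.enumerate L k, k ≤ p.1 := by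
  induction L generalizing k with
  | nil => simp [PySem.List.enumerate]
  | cons x L ih =>
    intro p hp
    rw [pvEnum_cons] at hp
    rcases List.mem_cons.mp hp with hp | hp
    · simp [hp]
    · have := ih (k+1) p hp; omega

theorem pvEnumerate_pairwise {α : Type} (L : List α) (k : Int) :
    (PySem.List.enumerate L k).Pairwise (fun a b => a.1 < b.1) := by
  induction L generalizing k with
  | nil => simp [PySem.List.enumerate]
  | cons x L ih =>
    rw [pvEnum_cons]
    refine List.Pairwise.cons ?_ (ih (k+1))
    intro p hp
    have := pvEnumerate_lb L (k+1) p hp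
    omega

theorem pvEnumerate_get_aux {α : Type} (M L : List α) :
    ∀ p ∈ PySem.List.enumerate L (M.length : Int), PySem.List.pyGet? (M ++ L) p.1 = some p.2 := by
  induction L generalizing M with
  | nil => simp [PySem.List.enumerate]
  | cons x L ih =>
    intro p hp
    rw [pvEnum_cons] at hp
    rcases List.mem_cons.mp hp with hp | hp
    · subst hp
      simp
    · have h2 := ih (M ++ [x])
      simp only [List.length_append, List.length_singleton, Nat.cast_add, Nat.cast_one,
        List.append_assoc, List.singleton_append] at h2
      exact h2 p hp

theorem pvEnumerate_get {α : Type} (L : List α) :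
    ∀ p ∈ PySem.List.enumerate L, PySem.List.pyGet? L p.1 = some p.2 := by
  have h := pvEnumerate_get_aux [] L
  simpa using h

theorem pvFlatMap_enumerate {α β : Type} (L : List α) (k : Int) (g : α → List β) :
    (PySem.List.enumerate L k).flatMap (fun p => g p.2) = L.flatMap g := by
  induction L generalizing k with
  | nil => simp [PySem.List.enumerate]
  | cons x L ih => rw [pvEnum_cons]; simp [ih]

theorem pvMerged_pw {α : Type} (E : List (Int × α)) (q1 q2 q3 : Int × α → Bool)
    (hE : E.Pairwise (fun a b => a.1 < b.1)) :
    (E.flatMap (fun p => (if q1 p then [p.1] else []) ++ (if q2 p then [p.1] else [])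
      ++ (if q3 p then [p.1] else []))).Pairwise (fun a b => a ≤ b) := by
  have hmem : ∀ (z : Int) (q : Int × α), z ∈ ((if q1 q then [q.1] else []) ++ (if q2 q then [q.1] else [])
      ++ (if q3 q then [q.1] else [])) → z = q.1 := by
    intro z q hz
    by_cases h1 : q1 q <;> by_cases h2 : q2 q <;> by_cases h3 : q3 q <;> simp_all
  induction E with
  | nil => simp
  | cons p E ih =>
    rw [List.flatMap_cons, List.pairwise_append]
    refine ⟨?_, ih hE.of_cons, ?_⟩
    · by_cases h1 : q1 p <;> by_cases h2 : q2 p <;> by_cases h3 : q3 p <;>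
        simp [h1, h2, h3, List.pairwise_cons]
    · intro x hx y hy
      have hxp := hmem x p hx
      rcases List.mem_flatMap.mp hy with ⟨q, hq, hyq⟩
      have hyq' := hmem y q hyq
      have := (List.pairwise_cons.mp hE).1 q hq
      omega

-- B's sort undoes the by-operator grouping: it yields the indices in conditions2 order
theorem pvSorted_js (c1 : String) (L : List String) :
    PySem.List.sorted (pvJs c1 (PySem.List.enumerate L)) (fun j => j)
      = pvMerged c1 (PySem.List.enumerate L) := by
  refine PySem.List.eq_of_perm_of_pairwise_le_of_injective (fun j => j) (fun a b h => h) ?_ ?_ ?_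
  · exact (PySem.List.sorted_perm _ _ _).trans
      (pvPerm (PySem.List.enumerate L) (pvT1 c1) (pvT2 c1) (pvT3 c1) (fun p => p.1))
  · exact PySem.List.sorted_pairwise _ _
  · exact pvMerged_pw _ _ _ _ (pvEnumerate_pairwise L 0)

-- per-c1 core: A's inner scan over conditions2 = B's sorted lookup result, mapped to messages
theorem pvInner (c1 : String) (L : List String) :
    L.flatMap (pvGA c1)
      = (PySem.List.sorted (pvJs c1 (PySem.List.enumerate L)) (fun j => j)).map
          (fun j => pvMsg c1 ((PySem.List.pyGet? L j).getD "")) := by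
  rw [pvSorted_js, ← pvFlatMap_enumerate L 0 (pvGA c1)]
  unfold pvMerged
  rw [List.map_flatMap, List.flatMap_def, List.flatMap_def]
  congr 1
  apply List.map_congr_left
  intro p hp
  have hget : PySem.List.pyGet? L p.1 = some p.2 := pvEnumerate_get L p hp
  have hT1 : pvT1 c1 p = pvT1 c1 (0, p.2) := rfl
  have hT2 : pvT2 c1 p = pvT2 c1 (0, p.2) := rfl
  have hT3 : pvT3 c1 p = pvT3 c1 (0, p.2) := rfl
  unfold pvGA
  rw [← hT1, ← hT2, ← hT3]
  by_cases h1 : pvT1 c1 p <;> by_cases h2 : pvT2 c1 p <;> by_cases h3 : pvT3 c1 p <;>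
    simp [h1, h2, h3, hget]

-- A as a double flatMap
theorem pvA_eq (conditions1 conditions2 : List String) :
    find_contradictions_between_conditions_py conditions1 conditions2
      = conditions1.flatMap (fun c1 => conditions2.flatMap (pvGA c1)) := by
  unfold find_contradictions_between_conditions_py
  have hinner : ∀ c1 acc, conditions2.foldl (fun contradictions cond2 =>
      let contradictions :=
        if PySem.Str.isIn ">" c1 && PySem.Str.isIn "<=" cond2 && (pvKey c1 ">" == pvKey cond2 "<=")
        then contradictions ++ [pvMsg c1 cond2] else contradictions
      let contradictions :=
        if PySem.Str.isIn "<" c1 && PySem.Str.isIn ">=" cond2 && (pvKey c1 "<" == pvKey cond2 ">=")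
        then contradictions ++ [pvMsg c1 cond2] else contradictions
      if PySem.Str.isIn "==" c1 && PySem.Str.isIn "!=" cond2 && (pvKey c1 "==" == pvKey cond2 "!=")
      then contradictions ++ [pvMsg c1 cond2] else contradictions) acc
      = acc ++ conditions2.flatMap (pvGA c1) := by
    intro c1 acc
    rw [show (fun contradictions cond2 =>
      let contradictions :=
        if PySem.Str.isIn ">" c1 && PySem.Str.isIn "<=" cond2 && (pvKey c1 ">" == pvKey cond2 "<=")
        then contradictions ++ [pvMsg c1 cond2] else contradictions
      let contradictions :=
        if PySem.Str.isIn "<" c1 && PySem.Str.isIn ">=" cond2 && (pvKey c1 "<" == pvKey cond2 ">=")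
        then contradictions ++ [pvMsg c1 cond2] else contradictions
      if PySem.Str.isIn "==" c1 && PySem.Str.isIn "!=" cond2 && (pvKey c1 "==" == pvKey cond2 "!=")
      then contradictions ++ [pvMsg c1 cond2] else contradictions)
      = fun (acc : List String) cond2 => acc ++ pvGA c1 cond2 from ?_]
    · exact PySem.List.foldl_append_eq_flatMap _ _ _
    · funext acc c2
      simp only [pvGA, pvT1, pvT2, pvT3]
      split_ifs <;> simp
  calc conditions1.foldl _ []
      = conditions1.foldl (fun acc c1 => acc ++ conditions2.flatMap (pvGA c1)) [] := by
        apply PySem.List.foldl_congr_mem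
        intro acc c1 _
        exact hinner c1 acc
    _ = conditions1.flatMap (fun c1 => conditions2.flatMap (pvGA c1)) := by
        rw [PySem.List.foldl_append_eq_flatMap]; simp

-- B as a flatMap of sorted index lookups
theorem pvB_eq (conditions1 conditions2 : List String) :
    find_contradictions_between_conditions_py_alt conditions1 conditions2
      = conditions1.flatMap (fun c1 =>
          (PySem.List.sorted (pvJs c1 (PySem.List.enumerate conditions2)) (fun j => j)).map
            (fun j => pvMsg c1 ((PySem.List.pyGet? conditions2 j).getD ""))) := by
  unfold find_contradictions_between_conditions_py_alt
  have hjs : ∀ c1,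
      (PySem.List.sorted
        (if PySem.Str.isIn "==" c1 then
          (if PySem.Str.isIn "<" c1 then
            (if PySem.Str.isIn ">" c1 then ([] : List Int) ++ (pvIndexByLeft conditions2 "<=").getD (pvKey c1 ">") [] else [])
              ++ (pvIndexByLeft conditions2 ">=").getD (pvKey c1 "<") []
          else (if PySem.Str.isIn ">" c1 then ([] : List Int) ++ (pvIndexByLeft conditions2 "<=").getD (pvKey c1 ">") [] else []))
            ++ (pvIndexByLeft conditions2 "!=").getD (pvKey c1 "==") []
        else (if PySem.Str.isIn "<" c1 then
            (if PySem.Str.isIn ">" c1 then ([] : List Int) ++ (pvIndexByLeft conditions2 "<=").getD (pvKey c1 ">") [] else [])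
              ++ (pvIndexByLeft conditions2 ">=").getD (pvKey c1 "<") []
          else (if PySem.Str.isIn ">" c1 then ([] : List Int) ++ (pvIndexByLeft conditions2 "<=").getD (pvKey c1 ">") [] else [])))
        (fun j => j))
      = PySem.List.sorted (pvJs c1 (PySem.List.enumerate conditions2)) (fun j => j) := by
    intro c1
    congr 1
    have e1 : (if PySem.Str.isIn ">" c1 then ([] : List Int) ++ (pvIndexByLeft conditions2 "<=").getD (pvKey c1 ">") [] else [])
        = ((PySem.List.enumerate conditions2).filter (pvT1 c1)).map (fun p => p.1) := by
      rw [pvIndexByLeft_getD]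
      by_cases h : PySem.Str.isIn ">" c1
      · rw [if_pos h]
        simp only [List.nil_append]
        congr 1
        apply List.filter_congr
        intro p _
        simp only [pvT1, h, Bool.true_and, pvBeqComm]
      · rw [if_neg h]
        rw [show ((PySem.List.enumerate conditions2).filter (pvT1 c1)) = [] from ?_]
        · simp
        · apply List.filter_eq_nil_iff.mpr
          intro p _
          simp only [pvT1, eq_false_of_ne_true h, Bool.false_and]; decide
    have e2 : (if PySem.Str.isIn "<" c1 then (pvIndexByLeft conditions2 ">=").getD (pvKey c1 "<") [] else [])
        = ((PySem.List.enumerate conditions2).filter (pvT2 c1)).map (fun p => p.1) := by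
      rw [pvIndexByLeft_getD]
      by_cases h : PySem.Str.isIn "<" c1
      · rw [if_pos h]
        congr 1
        apply List.filter_congr
        intro p _
        simp only [pvT2, h, Bool.true_and, pvBeqComm]
      · rw [if_neg h]
        rw [show ((PySem.List.enumerate conditions2).filter (pvT2 c1)) = [] from ?_]
        · simp
        · apply List.filter_eq_nil_iff.mpr
          intro p _
          simp only [pvT2, eq_false_of_ne_true h, Bool.false_and]; decide
    have e3 : (if PySem.Str.isIn "==" c1 then (pvIndexByLeft conditions2 "!=").getD (pvKey c1 "==") [] else [])
        = ((PySem.List.enumerate conditions2).filter (pvT3 c1)).map (fun p => p.1) := by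
      rw [pvIndexByLeft_getD]
      by_cases h : PySem.Str.isIn "==" c1
      · rw [if_pos h]
        congr 1
        apply List.filter_congr
        intro p _
        simp only [pvT3, h, Bool.true_and, pvBeqComm]
      · rw [if_neg h]
        rw [show ((PySem.List.enumerate conditions2).filter (pvT3 c1)) = [] from ?_]
        · simp
        · apply List.filter_eq_nil_iff.mpr
          intro p _
          simp only [pvT3, eq_false_of_ne_true h, Bool.false_and]; decide
    unfold pvJs
    rw [← e1, ← e2, ← e3]
    clear e1 e2 e3
    by_cases h1 : PySem.Str.isIn ">" c1 <;> by_cases h2 : PySem.Str.isIn "<" c1 <;>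
      by_cases h3 : PySem.Str.isIn "==" c1 <;> simp_all [List.append_assoc]
  calc conditions1.foldl _ []
      = conditions1.foldl (fun acc c1 => acc ++
          (PySem.List.sorted (pvJs c1 (PySem.List.enumerate conditions2)) (fun j => j)).map
            (fun j => pvMsg c1 ((PySem.List.pyGet? conditions2 j).getD ""))) [] := by
        apply PySem.List.foldl_congr_mem
        intro acc c1 _
        rw [PySem.List.foldl_append_singleton_eq_map
          (fun j => pvMsg c1 ((PySem.List.pyGet? conditions2 j).getD ""))]
        rw [hjs c1]
    _ = _ := by rw [PySem.List.foldl_append_eq_flatMap]; simp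

-- ===== VERDICT (by name: the statement is the Claim_ definition above) =====
theorem find_contradictions_between_conditions_py_spec : Claim_equal_find_contradictions_between_conditions_py := by
  intro conditions1 conditions2 _
  unfold Spec_find_contradictions_between_conditions_py
  rw [pvA_eq, pvB_eq]
  exact congrArg (fun f => conditions1.flatMap f) (funext (fun c1 => pvInner c1 conditions2))
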